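-- pv_equiv track=rewrite | github.com/pypi-data/pypi-mirror-333 | packages/fragment-qc/fragment_qc-0.5.0.tar.gz/fragment_qc-0.5.0/tests/core/test_PIE_performance.py | MBE_frags
-- ===== SOURCE A (Python) =====
-- from itertools import combinations, product
--
-- def MBE_frags(N_f: int, n: int, r=0):
--     """
--     Creates array of primary non-overlapping fragments
--
--     Creates higher order combinations with an optional screening procedure
--     """
--     # Create primary fragments
--     primary = [frozenset({i}) for i in range(N_f)]
--
--     # Create auxiliary fragments
--     aux = [frozenset.union(*i) for i in combinations(primary, n)]
--
--     # Create screened or unscreened auxiliary fragments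
--     if r:
--         # Screening checks if the min index or max index are within r of each other
--         # Default is r = 7
--         def keeper(i: frozenset[int]) -> bool:
--             return (max(i) - min(i)) <= r
--
--         aux = [a for a in aux if keeper(a)]
--
--     return primary, aux
-- ===== SOURCE B (Python) =====
-- from itertools import combinations
--
-- def MBE_frags(N_f: int, n: int, r=0):
--     """Same result as A, but the screened case enumerates, for each minimum
--     element m, only the combinations drawn from the radius-r window
--     (m+1 .. m+r), skipping windows too small to hold n-1 elements."""
--     primary = [frozenset({i}) for i in range(N_f)]
--     if not r:
--         aux = [frozenset(c) for c in combinations(range(N_f), n)]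
--     elif n == 1:
--         aux = [frozenset({m}) for m in range(N_f)] if r >= 0 else []
--     else:
--         aux = []
--         for m in range(N_f):
--             hi = min(m + r, N_f - 1)
--             if hi - m >= n - 1:
--                 aux.extend(frozenset({m}.union(c))
--                            for c in combinations(range(m + 1, hi + 1), n - 1))
--     return primary, aux
-- ===== Notes on version B (the rewrite author's own statement) =====
-- stated objective: alternative
-- what changed: Instead of generating all C(N_f,n) combinations and filtering by span, B enumerates, for each minimum element m, only the combinations of the radius-r window (m+1..min(m+r,N_f-1)), skipping windows too small to hold n-1 elements (plain combinations of index ranges when r=0).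
import Mathlib
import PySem

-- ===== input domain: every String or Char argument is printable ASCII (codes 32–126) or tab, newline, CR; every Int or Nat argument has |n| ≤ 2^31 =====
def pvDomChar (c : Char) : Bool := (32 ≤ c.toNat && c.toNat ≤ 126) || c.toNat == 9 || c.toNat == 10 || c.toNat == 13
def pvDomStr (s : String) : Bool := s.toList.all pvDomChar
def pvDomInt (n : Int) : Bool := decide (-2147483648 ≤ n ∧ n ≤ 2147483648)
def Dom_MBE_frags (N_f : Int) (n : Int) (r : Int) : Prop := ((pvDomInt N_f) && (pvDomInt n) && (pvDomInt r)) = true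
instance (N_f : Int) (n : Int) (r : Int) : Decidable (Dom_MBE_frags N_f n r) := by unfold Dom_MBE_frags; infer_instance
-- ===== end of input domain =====

-- B replaces A's generate-all-then-filter by a different enumeration: per minimum element m,
-- only the combinations inside the radius-r window are generated (same output, same order).

-- itertools.combinations(xs, k) in lexicographic order (shared helper: both Pythons call it)
def combos {α : Type} : List α → Nat → List (List α)
  | _, 0 => [[]]
  | [], _ + 1 => []
  | x :: xs, k + 1 => ((combos xs k).map (x :: ·)) ++ combos xs (k + 1)

-- ===== PORT A =====
-- keeper(i): (max(i) - min(i)) <= r ; the `none` branches are unreachable (aux members are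
-- nonempty under Pre_, n ≥ 1)
def keeperA (r : Int) (a : List Int) : Bool :=
  match PySem.List.max? a (fun x => x), PySem.List.min? a (fun x => x) with
  | some M, some m => decide (M - m ≤ r)
  | _, _ => false

-- n.toNat is exact under Pre_ (n ≥ 1); `if r = 0` is Python's truthiness test `if r:`
def MBE_frags (N_f : Int) (n : Int) (r : Int) : List (List Int) × List (List Int) :=
  let primary := (PySem.List.pyRange 0 N_f 1).map (fun i => [i])
  let aux := (combos primary n.toNat).map (fun c => PySem.Set.ofList c.flatten)
  (primary, if r = 0 then aux else aux.filter (keeperA r))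

-- ===== PORT B =====
def MBE_frags_alt (N_f : Int) (n : Int) (r : Int) : List (List Int) × List (List Int) :=
  let primary := (PySem.List.pyRange 0 N_f 1).map (fun i => [i])
  let aux :=
    if r = 0 then
      (combos (PySem.List.pyRange 0 N_f 1) n.toNat).map PySem.Set.ofList
    else if n = 1 then
      (if 0 ≤ r then (PySem.List.pyRange 0 N_f 1).map (fun m => [m]) else [])
    else
      (PySem.List.pyRange 0 N_f 1).flatMap (fun m =>
        if min (m + r) (N_f - 1) - m ≥ n - 1 then
          (combos (PySem.List.pyRange (m + 1) (min (m + r) (N_f - 1) + 1) 1) (n.toNat - 1)).map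
            (fun c => PySem.Set.ofList (m :: c))
        else [])
  (primary, aux)

-- ===== PRECONDITION & SPEC =====
-- Pre_ excludes exactly the inputs where A raises: n = 0 (TypeError from frozenset.union())
-- and n < 0 (ValueError from itertools.combinations).
def Pre_MBE_frags (N_f : Int) (n : Int) (r : Int) : Prop := 1 ≤ n
instance (N_f : Int) (n : Int) (r : Int) : Decidable (Pre_MBE_frags N_f n r) := by unfold Pre_MBE_frags; infer_instance
def pvWitness_MBE_frags : Int × Int × Int := (5, 2, 2)

def Spec_MBE_frags (N_f : Int) (n : Int) (r : Int) (out : List (List Int) × List (List Int)) : Prop := out = MBE_frags_alt N_f n r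
instance (N_f : Int) (n : Int) (r : Int) (out : List (List Int) × List (List Int)) : Decidable (Spec_MBE_frags N_f n r out) := by unfold Spec_MBE_frags; infer_instance

-- ===== CLAIM (what is proved, stated in full; the proofs are below) =====
def Claim_equal_MBE_frags : Prop := ∀ (N_f : Int) (n : Int) (r : Int), Dom_MBE_frags N_f n r → Pre_MBE_frags N_f n r → Spec_MBE_frags N_f n r (MBE_frags N_f n r)

-- ===== LEMMAS AND PROOFS =====

theorem combos_sublist {α : Type} {xs : List α} {k : Nat} {c : List α}
    (h : c ∈ combos xs k) : c.Sublist xs := by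
  induction xs generalizing c k with
  | nil => cases k <;> simp_all [combos]
  | cons x xs ih =>
    cases k with
    | zero => simp_all [combos]
    | succ k =>
      simp only [combos, List.mem_append, List.mem_map] at h
      rcases h with ⟨d, hd, rfl⟩ | h
      · exact (ih hd).cons₂ x
      · exact (ih h).cons x

theorem combos_length {α : Type} {xs : List α} {k : Nat} {c : List α}
    (h : c ∈ combos xs k) : c.length = k := by
  induction xs generalizing c k with
  | nil => cases k <;> simp_all [combos]
  | cons x xs ih =>
    cases k with
    | zero => simp_all [combos]
    | succ k =>
      simp only [combos, List.mem_append, List.mem_map] at h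
      rcases h with ⟨d, hd, rfl⟩ | h
      · simp [ih hd]
      · exact ih h

theorem combos_map {α β : Type} (f : α → β) (xs : List α) (k : Nat) :
    combos (xs.map f) k = (combos xs k).map (List.map f) := by
  induction xs generalizing k with
  | nil => cases k <;> simp [combos]
  | cons x xs ih =>
    cases k with
    | zero => simp [combos]
    | succ k => simp [combos, ih, List.map_map]

theorem combos_filter_all {α : Type} (p : α → Bool) (xs : List α) (k : Nat) :
    (combos xs k).filter (fun c => c.all p) = combos (xs.filter p) k := by
  induction xs generalizing k with
  | nil => cases k <;> simp [combos]
  | cons x xs ih =>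
    cases k with
    | zero => simp [combos]
    | succ k =>
      by_cases hx : p x
      · simp [combos, hx, List.filter_append, List.filter_map, Function.comp_def, ← ih]
      · simp [combos, hx, List.filter_append, List.filter_map, Function.comp_def, ← ih k.succ]

theorem combos_one {α : Type} (xs : List α) : combos xs 1 = xs.map (fun x => [x]) := by
  induction xs with
  | nil => simp [combos]
  | cons x xs ih => simp [combos, ih]

theorem pyRange_filter_le (a b t : Int) :
    (PySem.List.pyRange a b 1).filter (fun x => decide (x ≤ t)) =
      PySem.List.pyRange a (min (t + 1) b) 1 := by
  by_cases hab : b ≤ a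
  · rw [PySem.List.pyRange_one_eq_nil hab, PySem.List.pyRange_one_eq_nil (by omega)]
    rfl
  · push_neg at hab
    have hm : (b - (a + 1)).toNat < (b - a).toNat := by omega
    rw [PySem.List.pyRange_one_cons hab]
    by_cases hat : a ≤ t
    · rw [List.filter_cons_of_pos (by simpa), pyRange_filter_le (a + 1) b t,
        ← PySem.List.pyRange_one_cons (lt_min (by omega) hab)]
    · rw [List.filter_cons_of_neg (by simpa using hat), pyRange_filter_le (a + 1) b t]
      have h1 : min (t + 1) b ≤ a := le_trans (min_le_left _ _) (by omega)
      rw [PySem.List.pyRange_one_eq_nil h1, PySem.List.pyRange_one_eq_nil (le_trans h1 (by omega))]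
  termination_by (b - a).toNat

theorem foldl_max_le_iff (c : List Int) (a t : Int) :
    (c.foldl max a ≤ t) ↔ (a ≤ t ∧ ∀ x ∈ c, x ≤ t) := by
  induction c generalizing a with
  | nil => simp
  | cons x c ih =>
    simp only [List.foldl_cons, ih, List.mem_cons]
    constructor
    · rintro ⟨h1, h2⟩
      exact ⟨le_trans (le_max_left _ _) h1, fun y hy => hy.elim (fun e => e ▸ le_trans (le_max_right _ _) h1) (h2 y)⟩
    · rintro ⟨h1, h2⟩
      exact ⟨max_le h1 (h2 x (Or.inl rfl)), fun y hy => h2 y (Or.inr hy)⟩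

theorem foldl_min_eq (c : List Int) (a : Int) (h : ∀ x ∈ c, a ≤ x) :
    c.foldl min a = a := by
  induction c with
  | nil => rfl
  | cons x c ih =>
    simp only [List.foldl_cons, min_eq_left (h x (by simp))]
    exact ih (fun y hy => h y (by simp [hy]))

theorem keeperA_cons (r a : Int) (c : List Int) (hne : c ≠ [])
    (hlt : ∀ x ∈ c, a < x) :
    keeperA r (a :: c) = c.all (fun x => decide (x ≤ a + r)) := by
  obtain ⟨y, hy⟩ := List.exists_mem_of_ne_nil c hne
  unfold keeperA
  rw [PySem.List.max?_id_cons, PySem.List.min?_id_cons]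
  rw [foldl_min_eq c a (fun x hx => le_of_lt (hlt x hx))]
  have : (c.foldl max a - a ≤ r) ↔ (∀ x ∈ c, x ≤ a + r) := by
    rw [sub_le_iff_le_add, add_comm r a, foldl_max_le_iff]
    constructor
    · exact fun h => h.2
    · exact fun h => ⟨le_of_lt (lt_of_lt_of_le (hlt y hy) (h y hy)), h⟩
  apply Bool.eq_iff_iff.mpr
  simp [this]

theorem ofList_of_combos_pyRange {a b : Int} {k : Nat} {c : List Int}
    (h : c ∈ combos (PySem.List.pyRange a b 1) k) : PySem.Set.ofList c = c :=
  PySem.Set.ofList_eq_self_of_nodup c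
    ((combos_sublist h).nodup (PySem.List.nodup_pyRange_one a b))

theorem combos_eq_nil_of_short {α : Type} (xs : List α) (k : Nat) (h : xs.length < k) :
    combos xs k = [] := by
  induction xs generalizing k with
  | nil => cases k with
    | zero => simp at h
    | succ k => rfl
  | cons x xs ih =>
    cases k with
    | zero => simp at h
    | succ k =>
      simp only [combos, List.append_eq_nil_iff, List.map_eq_nil_iff]
      exact ⟨ih k (by simpa using h), ih (k + 1) (by simp at h ⊢; omega)⟩

theorem flatten_map_singleton (l : List Int) : (l.map (fun i => [i])).flatten = l := by
  induction l with
  | nil => rfl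
  | cons x l ih => simp [ih]

theorem ofList_cons_combos {m u : Int} {k : Nat} {c : List Int}
    (h : c ∈ combos (PySem.List.pyRange (m + 1) u 1) k) :
    PySem.Set.ofList (m :: c) = m :: c := by
  apply PySem.Set.ofList_eq_self_of_nodup
  refine List.nodup_cons.mpr ⟨?_, (combos_sublist h).nodup (PySem.List.nodup_pyRange_one _ _)⟩
  intro hm
  have := PySem.List.mem_pyRange_one.mp ((combos_sublist h).subset hm)
  omega

theorem mem_of_combos_pyRange {a b : Int} {k : Nat} {c : List Int}
    (h : c ∈ combos (PySem.List.pyRange a b 1) k) : ∀ x ∈ c, a ≤ x ∧ x < b := by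
  intro x hx
  exact PySem.List.mem_pyRange_one.mp ((combos_sublist h).subset hx)

-- the heart: screened lex combinations = per-minimum window enumeration
theorem screened_main (k : Nat) (r a b : Int) :
    (combos (PySem.List.pyRange a b 1) (k + 2)).filter (keeperA r) =
      (PySem.List.pyRange a b 1).flatMap (fun m =>
        (combos (PySem.List.pyRange (m + 1) (min (m + r + 1) b) 1) (k + 1)).map (m :: ·)) := by
  by_cases hab : b ≤ a
  · rw [PySem.List.pyRange_one_eq_nil hab]; rfl
  · push_neg at hab
    have hm : (b - (a + 1)).toNat < (b - a).toNat := by omega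
    rw [PySem.List.pyRange_one_cons hab]
    show (((combos (PySem.List.pyRange (a+1) b 1) (k+1)).map (a :: ·)
          ++ combos (PySem.List.pyRange (a+1) b 1) (k+2)).filter (keeperA r)) = _
    rw [List.filter_append, List.filter_map, List.flatMap_cons,
      screened_main k r (a + 1) b]
    congr 1
    have hcong : ∀ c ∈ combos (PySem.List.pyRange (a+1) b 1) (k+1),
        (keeperA r ∘ (a :: ·)) c = c.all (fun x => decide (x ≤ a + r)) := by
      intro c hc
      have hne : c ≠ [] := by
        intro h; have := combos_length hc; simp [h] at this
      have hlt : ∀ x ∈ c, a < x := fun x hx => by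
        have := (mem_of_combos_pyRange hc x hx).1; omega
      exact keeperA_cons r a c hne hlt
    rw [List.filter_congr hcong, combos_filter_all, pyRange_filter_le]
  termination_by (b - a).toNat

-- ===== VERDICT (by name: the statement is the Claim_ definition above) =====
theorem MBE_frags_spec : Claim_equal_MBE_frags := by
  intro N_f n r _ hpre
  unfold Spec_MBE_frags MBE_frags MBE_frags_alt
  simp only
  congr 1
  rw [combos_map, List.map_map]
  have hflat : ((fun c => PySem.Set.ofList c.flatten) ∘ List.map (fun i : Int => [i]))
      = PySem.Set.ofList := by
    funext c
    simp [Function.comp, flatten_map_singleton]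
  rw [hflat]
  by_cases hr : r = 0
  · simp [hr]
  · rw [if_neg hr, if_neg hr]
    have hself : ∀ c ∈ combos (PySem.List.pyRange 0 N_f 1) n.toNat,
        PySem.Set.ofList c = c := fun c hc => ofList_of_combos_pyRange hc
    rw [List.map_congr_left hself, List.map_id']
    by_cases hn1 : n = 1
    · rw [if_pos hn1]
      subst hn1
      show (combos (PySem.List.pyRange 0 N_f 1) 1).filter (keeperA r) = _
      rw [combos_one, List.filter_map]
      have hcong : ∀ m ∈ PySem.List.pyRange 0 N_f 1,
          (keeperA r ∘ fun x => [x]) m = decide (0 ≤ r) := by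
        intro m _
        show keeperA r [m] = decide (0 ≤ r)
        unfold keeperA
        rw [PySem.List.max?_id_cons, PySem.List.min?_id_cons]
        simp only [List.foldl_nil, sub_self]
      rw [List.filter_congr hcong]
      by_cases h0 : 0 ≤ r
      · simp [h0]
      · simp [h0]
    · rw [if_neg hn1]
      have hn2 : (2 : Int) ≤ n := by
        unfold Pre_MBE_frags at hpre
        rcases lt_or_ge n 2 with h | h
        · exact absurd (by omega : n = 1) hn1
        · exact h
      have hk : n.toNat = (n.toNat - 2) + 2 := by omega
      rw [hk, screened_main]
      have hbody : ∀ m ∈ PySem.List.pyRange 0 N_f 1,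
          ((combos (PySem.List.pyRange (m + 1) (min (m + r + 1) N_f) 1) ((n.toNat - 2) + 1)).map
            (m :: ·))
          = (if min (m + r) (N_f - 1) - m ≥ n - 1 then
              ((combos (PySem.List.pyRange (m + 1) (min (m + r) (N_f - 1) + 1) 1)
                ((n.toNat - 2) + 2 - 1)).map (fun c => PySem.Set.ofList (m :: c)))
            else []) := by
        intro m _
        have hmm : min (m + r) (N_f - 1) + 1 = min (m + r + 1) N_f := by
          simp only [min_def]; split_ifs <;> omega
        rw [show (n.toNat - 2) + 2 - 1 = (n.toNat - 2) + 1 from by omega]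
        split_ifs with hg
        · rw [hmm]
          exact List.map_congr_left (fun c hc => (ofList_cons_combos hc).symm)
        · rw [combos_eq_nil_of_short _ _ ?hlen, List.map_nil]
          case hlen =>
            rw [PySem.List.length_pyRange_one, ← hmm]
            set M := min (m + r) (N_f - 1) with hM
            omega
      simp only [List.flatMap_def]
      exact congrArg List.flatten (List.map_congr_left hbody)
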